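-- pv_equiv track=rewrite | github.com/GUNH003/lit_review_fullstack_rag_system | rag/parser.py | page_text_handler_linux
-- ===== SOURCE A (Python) =====
-- def page_text_handler_linux(text: str) -> str:
--     newline_count = 0
--     index = -1
--     for i, char in enumerate(text):
--         if char == '\n':
--             newline_count += 1
--             if newline_count == 5:
--                 index = i
--                 break
--     if index != -1:
--         return text[index + 1:]
--     return text
-- ===== SOURCE B (Python) =====
-- def page_text_handler_linux(text: str) -> str:
--     parts = text.split('\n', 5)
--     if len(parts) == 6:
--         return parts[5]
--     return text
-- ===== Notes on version B (the rewrite author's own statement) =====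
-- stated objective: idiomatic
-- what changed: Replaces the manual enumerate loop that counts newlines and slices at the recorded index with a single bounded str.split (maxsplit 5) followed by a length guard and indexing; the split runs in C, removing the per-character Python-level loop.
import Mathlib
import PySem

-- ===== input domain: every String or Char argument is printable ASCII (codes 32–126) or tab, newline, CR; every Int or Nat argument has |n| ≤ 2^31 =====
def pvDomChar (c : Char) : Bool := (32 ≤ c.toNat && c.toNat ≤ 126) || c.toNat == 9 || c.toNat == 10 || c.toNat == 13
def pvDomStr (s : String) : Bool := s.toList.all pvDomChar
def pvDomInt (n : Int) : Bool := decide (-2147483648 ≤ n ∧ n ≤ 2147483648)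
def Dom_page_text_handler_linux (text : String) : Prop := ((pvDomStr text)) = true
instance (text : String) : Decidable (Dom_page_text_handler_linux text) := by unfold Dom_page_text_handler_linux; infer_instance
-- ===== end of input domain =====

-- B replaces A's manual newline-counting enumerate loop by the idiomatic text.split('\n', 5) with a length guard; same return value.


-- ===== PORT A =====
-- the for-loop with break: walk the characters carrying (newline_count, i); return index (-1 if no break)
def pageLoopA : List Char → Int → Int → Int
  | [], _, _ => -1
  | c :: rest, newline_count, i =>
    if c = '\n' then
      if newline_count + 1 = 5 then i
      else pageLoopA rest (newline_count + 1) (i + 1)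
    else pageLoopA rest newline_count (i + 1)

def page_text_handler_linux (text : String) : String :=
  let index := pageLoopA text.toList 0 0
  if index ≠ -1 then PySem.Str.slice text (some (index + 1)) none
  else text

-- ===== PORT B =====
def page_text_handler_linux_alt (text : String) : String :=
  match PySem.Str.splitMax? text "\n" 5 with
  | none => text   -- unreachable: the separator "\n" is nonempty
  | some parts => if parts.length = 6 then (PySem.List.pyGet? parts 5).getD "" else text

-- ===== PRECONDITION & SPEC =====
def Spec_page_text_handler_linux (text : String) (out : String) : Prop := out = page_text_handler_linux_alt text
instance (text : String) (out : String) : Decidable (Spec_page_text_handler_linux text out) := by unfold Spec_page_text_handler_linux; infer_instance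

-- ===== CLAIM (what is proved, stated in full; the proofs are below) =====
def Claim_equal_page_text_handler_linux : Prop := ∀ (text : String), Dom_page_text_handler_linux text → Spec_page_text_handler_linux text (page_text_handler_linux text)

-- ===== LEMMAS AND PROOFS =====

-- a fuel-free description of splitting on '\n' with at most m splits
def mySplit : Nat → List Char → List (List Char)
  | _, [] => [[]]
  | 0, l => [l]
  | m + 1, c :: rest =>
    if c = '\n' then [] :: mySplit m rest
    else
      match mySplit (m + 1) rest with
      | [] => [[c]]
      | p :: ps => (c :: p) :: ps

lemma mySplit_ne_nil (m : Nat) (l : List Char) : mySplit m l ≠ [] := by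
  cases l with
  | nil => simp [mySplit]
  | cons c rest =>
    cases m with
    | zero => simp [mySplit]
    | succ m =>
      simp only [mySplit]
      split
      · simp
      · split <;> simp

lemma mySplit_zero (l : List Char) : mySplit 0 l = [l] := by
  cases l <;> rfl

-- prepend pre onto the first piece
def consOnto (pre : List Char) : List (List Char) → List (List Char)
  | [] => [pre]
  | p :: ps => (pre ++ p) :: ps

lemma splitOnMax_go_eq (fuel : Nat) :
    ∀ (l : List Char) (m : Nat) (cur : List Char) (acc : List (List Char)),
      l.length < fuel →
      PySem.Chars.splitOnMax.go ['\n'] fuel m l cur acc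
        = acc.reverse ++ consOnto cur.reverse (mySplit m l) := by
  induction fuel with
  | zero => intro l m cur acc h; omega
  | succ fuel ih =>
    intro l m cur acc h
    cases l with
    | nil =>
      rw [PySem.Chars.splitOnMax.go]
      · simp [mySplit, consOnto]
      · omega
    | cons c rest =>
      rw [PySem.Chars.splitOnMax.go]
      cases m with
      | zero => simp [mySplit, consOnto]
      | succ m =>
        simp only [Nat.succ_ne_zero, if_false]
        by_cases hc : c = '\n'
        · subst hc
          have hpre : ((['\n'] : List Char).isPrefixOf ('\n' :: rest)) = true := by
            simp [List.isPrefixOf]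
          rw [if_pos hpre]
          have hdrop : List.drop (['\n'] : List Char).length ('\n' :: rest) = rest := rfl
          have hm : m + 1 - 1 = m := rfl
          rw [hdrop, hm, ih rest m [] (cur.reverse :: acc) (by simpa using h)]
          obtain ⟨p, ps, hps⟩ : ∃ p ps, mySplit m rest = p :: ps := by
            cases hsp : mySplit m rest with
            | nil => exact absurd hsp (mySplit_ne_nil m rest)
            | cons p ps => exact ⟨p, ps, rfl⟩
          simp [mySplit, hps, consOnto]
        · have hpre : ((['\n'] : List Char).isPrefixOf (c :: rest)) = false := by
            simp [List.isPrefixOf]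
            exact fun h' => hc (by simpa using h'.symm)
          rw [if_neg (by simp [hpre])]
          rw [ih rest (m+1) (c :: cur) acc (by simpa using h)]
          obtain ⟨p, ps, hps⟩ : ∃ p ps, mySplit (m+1) rest = p :: ps := by
            cases hsp : mySplit (m+1) rest with
            | nil => exact absurd hsp (mySplit_ne_nil (m+1) rest)
            | cons p ps => exact ⟨p, ps, rfl⟩
          simp [mySplit, hps, consOnto, hc]

lemma splitOnMax_eq_mySplit (cs : List Char) :
    PySem.Chars.splitOnMax cs ['\n'] 5 = mySplit 5 cs := by
  rw [PySem.Chars.splitOnMax]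
  have h5 : ¬ ((5:Int) < 0) := by norm_num
  rw [if_neg h5]
  rw [splitOnMax_go_eq (cs.length + 1) cs ((5:Int).toNat) [] [] (by omega)]
  obtain ⟨p, ps, hps⟩ : ∃ p ps, mySplit ((5:Int).toNat) cs = p :: ps := by
    cases hsp : mySplit ((5:Int).toNat) cs with
    | nil => exact absurd hsp (mySplit_ne_nil _ cs)
    | cons p ps => exact ⟨p, ps, rfl⟩
  have : ((5:Int).toNat) = 5 := rfl
  rw [this] at hps ⊢
  simp [hps, consOnto]

-- core correspondence between A's loop and mySplit
lemma key (cs : List Char) : ∀ (m : Nat) (i : Int), 1 ≤ m → m ≤ 5 →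
    (pageLoopA cs (5 - (m : Int)) i = -1 ∧ (mySplit m cs).length < m + 1)
    ∨ (∃ j : Nat, pageLoopA cs (5 - (m : Int)) i = i + j ∧
        (mySplit m cs).length = m + 1 ∧
        (mySplit m cs).getLast? = some (cs.drop (j + 1))) := by
  induction cs with
  | nil =>
    intro m i h1 h5
    left
    constructor
    · simp [pageLoopA]
    · simp [mySplit]; omega
  | cons c rest ih =>
    intro m i h1 h5
    obtain ⟨m', rfl⟩ : ∃ m', m = m' + 1 := ⟨m - 1, by omega⟩
    by_cases hc : c = '\n'
    · subst hc
      by_cases hm1 : m' = 0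
      · subst hm1
        right
        refine ⟨0, ?_, ?_, ?_⟩
        · simp [pageLoopA]
        · simp [mySplit, mySplit_zero]
        · simp [mySplit, mySplit_zero]
      · have harith : (5 : Int) - ((m' + 1 : Nat) : Int) + 1 ≠ 5 := by
          push_cast; omega
        have hloop : pageLoopA ('\n' :: rest) (5 - ((m' + 1 : Nat) : Int)) i
            = pageLoopA rest (5 - ((m' : Nat) : Int)) (i + 1) := by
          have harith2 : (5:Int) - ((m' + 1 : Nat) : Int) + 1 = 5 - ((m' : Nat) : Int) := by
            push_cast; omega
          simp only [pageLoopA, harith2, if_true]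
          rw [if_neg (by omega)]
        have hsplit : mySplit (m' + 1) ('\n' :: rest) = [] :: mySplit m' rest := by
          simp [mySplit]
        rcases ih m' (i + 1) (by omega) (by omega) with ⟨ha, hb⟩ | ⟨j, ha, hb, hcl⟩
        · left
          constructor
          · rw [hloop]; exact ha
          · rw [hsplit]; simp; omega
        · right
          refine ⟨j + 1, ?_, ?_, ?_⟩
          · rw [hloop, ha]; push_cast; omega
          · rw [hsplit]; simp [hb]
          · obtain ⟨p, ps, hps⟩ : ∃ p ps, mySplit m' rest = p :: ps := by
              cases hsp : mySplit m' rest with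
              | nil => exact absurd hsp (mySplit_ne_nil _ rest)
              | cons p ps => exact ⟨p, ps, rfl⟩
            rw [hsplit, hps, List.getLast?_cons_cons]
            rw [hps] at hcl
            simpa using hcl
    · have hloop : pageLoopA (c :: rest) (5 - ((m' + 1 : Nat) : Int)) i
          = pageLoopA rest (5 - ((m' + 1 : Nat) : Int)) (i + 1) := by
        simp [pageLoopA, hc]
      obtain ⟨p, ps, hps⟩ : ∃ p ps, mySplit (m' + 1) rest = p :: ps := by
        cases hsp : mySplit (m' + 1) rest with
        | nil => exact absurd hsp (mySplit_ne_nil _ rest)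
        | cons p ps => exact ⟨p, ps, rfl⟩
      have hsplit : mySplit (m' + 1) (c :: rest) = (c :: p) :: ps := by
        simp [mySplit, hc, hps]
      rcases ih (m' + 1) (i + 1) (by omega) (by omega) with ⟨ha, hb⟩ | ⟨j, ha, hb, hcl⟩
      · left
        constructor
        · rw [hloop]; exact ha
        · rw [hsplit]; rw [hps] at hb; simpa using hb
      · right
        refine ⟨j + 1, ?_, ?_, ?_⟩
        · rw [hloop, ha]; push_cast; omega
        · rw [hsplit]; rw [hps] at hb; simpa using hb
        · obtain ⟨q, qs, hqs⟩ : ∃ q qs, ps = q :: qs := by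
            cases hq : ps with
            | nil =>
              rw [hps, hq] at hb
              simp at hb
            | cons q qs => exact ⟨q, qs, rfl⟩
          rw [hsplit, hqs, List.getLast?_cons_cons]
          rw [hps, hqs, List.getLast?_cons_cons] at hcl
          simpa using hcl

-- ===== VERDICT (by name: the statement is the Claim_ definition above) =====
theorem page_text_handler_linux_spec : Claim_equal_page_text_handler_linux := by
  intro text _
  unfold Spec_page_text_handler_linux page_text_handler_linux page_text_handler_linux_alt
  have hsplit : PySem.Str.splitMax? text "\n" 5
      = some ((mySplit 5 text.toList).map String.ofList) := by
    rw [PySem.Str.splitMax?, PySem.Chars.splitMax?]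
    simp [splitOnMax_eq_mySplit]
  rw [hsplit]
  rcases key text.toList 5 0 (by norm_num) (by norm_num) with ⟨ha, hb⟩ | ⟨j, ha, hb, hcl⟩
  · have ha' : pageLoopA text.toList (5 - ((5:Nat):Int)) 0 = pageLoopA text.toList 0 0 := by norm_num
    rw [ha'] at ha
    simp only [ha]
    have hne6 : ¬ ((mySplit 5 text.toList).map String.ofList).length = 6 := by
      simp only [List.length_map]; omega
    rw [if_neg hne6]
    simp
  · have ha' : pageLoopA text.toList (5 - ((5:Nat):Int)) 0 = pageLoopA text.toList 0 0 := by norm_num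
    rw [ha'] at ha
    have hidx : pageLoopA text.toList 0 0 = (j : Int) := by rw [ha]; ring
    have hne : (j : Int) ≠ -1 := by omega
    simp only [hidx, hne, ne_eq, not_false_iff, if_pos]
    have hlen : ((mySplit 5 text.toList).map String.ofList).length = 6 := by
      simp [hb]
    rw [if_pos hlen]
    have hget : PySem.List.pyGet? ((mySplit 5 text.toList).map String.ofList) 5
        = some (String.ofList (text.toList.drop (j + 1))) := by
      have h5 : ((mySplit 5 text.toList).map String.ofList)[5]?
          = some (String.ofList (text.toList.drop (j + 1))) := by
        have hl : (mySplit 5 text.toList)[5]? = some (text.toList.drop (j + 1)) := by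
          have hgl := (List.getLast?_eq_getElem? (l := mySplit 5 text.toList))
          rw [hgl, hb] at hcl
          simpa using hcl
        simp [List.getElem?_map, hl]
      rw [show (5:Int) = ((5:Nat):Int) from rfl, PySem.List.pyGet?_natCast]
      exact h5
    rw [hget]
    simp only [Option.getD_some]
    rw [PySem.Str.slice]
    apply String.toList_inj.mp
    simp only [PySem.Chars.slice_eq_listSlice, String.toList_ofList]
    rw [PySem.List.slice_from text.toList (a := (j:Int)+1) (by omega)]
    congr 1
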